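-- pv_equiv track=rewrite | github.com/aorursy/KT_dataset_py | ikbuzsak_topiles.py | unique_two_lists
-- ===== SOURCE A (Python) =====
-- def unique_list(my_list):
--     return([
--         e
--         for i, e in enumerate(my_list)
--         if my_list.index(e) == i
--     ])
--
-- def unique_two_lists(x, y):
--     d = {}
--     for a, b in zip(x, y):
--         if a in d.keys():
--             d[a] += b
--         else:
--             d[a] = b
--     x = unique_list(x)
--     y = [d[a] for a in x]
--     return (x,y)
-- ===== SOURCE B (Python) =====
-- def unique_two_lists(x, y):
--     d = {}
--     for a, b in zip(x, y):
--         d[a] = d.get(a, 0) + b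
--     return (list(d.keys()), list(d.values()))
-- ===== Notes on version B (the rewrite author's own statement) =====
-- stated objective: faster
-- what changed: drops the quadratic unique_list(.index) pass and the lookup comprehension: one dict-accumulation pass whose insertion-ordered keys() and values() are the answer
import Mathlib
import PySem

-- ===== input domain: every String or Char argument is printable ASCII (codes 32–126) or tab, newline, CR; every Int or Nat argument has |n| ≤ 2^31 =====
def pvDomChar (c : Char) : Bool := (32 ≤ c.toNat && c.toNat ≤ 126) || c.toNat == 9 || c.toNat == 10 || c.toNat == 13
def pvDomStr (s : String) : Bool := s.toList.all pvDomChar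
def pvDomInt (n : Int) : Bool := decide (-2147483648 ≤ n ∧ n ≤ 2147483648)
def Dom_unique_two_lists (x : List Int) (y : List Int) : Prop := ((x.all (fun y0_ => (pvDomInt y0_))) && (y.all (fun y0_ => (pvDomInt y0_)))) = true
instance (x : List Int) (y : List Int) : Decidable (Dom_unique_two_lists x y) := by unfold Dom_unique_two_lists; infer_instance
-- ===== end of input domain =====

-- B replaces A's quadratic unique_list(.index) pass and lookup comprehension by one dict-accumulation
-- pass returning the dict's insertion-ordered keys and values (objective: faster).

-- ===== PORT A =====
-- [e for i, e in enumerate(my_list) if my_list.index(e) == i]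
def uniqueListA (l : List Int) : List Int :=
  (PySem.List.enumerate l).filterMap
    (fun p => if (PySem.List.index? l p.2).map (fun n : Nat => (n : Int)) = some p.1 then some p.2 else none)

def unique_two_lists (x : List Int) (y : List Int) : List Int × List Int :=
  let d := (x.zip y).foldl
    (fun d p => if d.contains p.1 then d.insert p.1 (d.getD p.1 0 + p.2) else d.insert p.1 p.2)
    PySem.Dict.empty
  let x' := uniqueListA x
  -- d[a] raises KeyError when a is missing; Pre_ excludes exactly those inputs, so getD's default is never used
  let y' := x'.map (fun a => d.getD a 0)
  (x', y')

-- ===== PORT B =====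
def unique_two_lists_alt (x : List Int) (y : List Int) : List Int × List Int :=
  let d := (x.zip y).foldl (fun d p => d.insert p.1 (d.getD p.1 0 + p.2)) PySem.Dict.empty
  (d.keys, d.values)

-- ===== PRECONDITION & SPEC =====
-- Pre_ excludes exactly the inputs on which A raises KeyError: some element of x whose first
-- occurrence lies beyond len(y) (zip truncates, so that key is never put into the dict).
def Pre_unique_two_lists (x : List Int) (y : List Int) : Prop :=
  ∀ a ∈ x, a ∈ x.take y.length
instance (x : List Int) (y : List Int) : Decidable (Pre_unique_two_lists x y) := by
  unfold Pre_unique_two_lists; infer_instance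

def pvWitness_unique_two_lists : List Int × List Int := ([1, 2, 1], [10, 20, 30])

def Spec_unique_two_lists (x : List Int) (y : List Int) (out : List Int × List Int) : Prop :=
  out = unique_two_lists_alt x y
instance (x : List Int) (y : List Int) (out : List Int × List Int) : Decidable (Spec_unique_two_lists x y out) := by
  unfold Spec_unique_two_lists; infer_instance

-- ===== CLAIM (what is proved, stated in full; the proofs are below) =====
def Claim_equal_unique_two_lists : Prop := ∀ (x : List Int) (y : List Int), Dom_unique_two_lists x y → Pre_unique_two_lists x y → Spec_unique_two_lists x y (unique_two_lists x y)


-- ===== LEMMAS AND PROOFS =====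

-- the new first occurrences contributed by l after the already-seen prefix p
def newElems (p l : List Int) : List Int :=
  match l with
  | [] => []
  | a :: l => if a ∈ p then newElems p l else a :: newElems (p ++ [a]) l

lemma newElems_congr (l p p' : List Int) (h : ∀ a, a ∈ p ↔ a ∈ p') :
    newElems p l = newElems p' l := by
  induction l generalizing p p' with
  | nil => rfl
  | cons a l ih =>
    simp only [newElems]
    by_cases ha : a ∈ p
    · rw [if_pos ha, if_pos ((h a).1 ha)]; exact ih p p' h
    · rw [if_neg ha, if_neg (fun hc => ha ((h a).2 hc))]
      congr 1
      exact ih _ _ (by intro b; simp [h b])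

lemma newElems_nil_of_subset (l p : List Int) (h : ∀ a ∈ l, a ∈ p) :
    newElems p l = [] := by
  induction l generalizing p with
  | nil => rfl
  | cons a l ih =>
    simp only [newElems, if_pos (h a (by simp))]
    exact ih p (fun b hb => h b (by simp [hb]))

lemma newElems_append_of_subset (T D p : List Int) (h : ∀ a ∈ D, a ∈ p ++ T) :
    newElems p (T ++ D) = newElems p T := by
  induction T generalizing p with
  | nil =>
    simp only [List.nil_append, newElems]
    exact newElems_nil_of_subset D p (by simpa using h)
  | cons u T ih =>
    simp only [List.cons_append, newElems]
    by_cases hu : u ∈ p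
    · rw [if_pos hu, if_pos hu]
      refine ih p (fun a ha => ?_)
      have := h a ha
      simp at this ⊢
      rcases this with h1 | h2 | h3
      · exact Or.inl h1
      · exact Or.inl (h2 ▸ hu)
      · exact Or.inr h3
    · rw [if_neg hu, if_neg hu]
      congr 1
      refine ih (p ++ [u]) (fun a ha => ?_)
      have := h a ha
      simp at this ⊢
      tauto

lemma update_eq_append_newElems (l : List Int) (s p : List Int)
    (h : ∀ a, a ∈ s ↔ a ∈ p) :
    PySem.Set.update s l = s ++ newElems p l := by
  induction l generalizing s p with
  | nil => simp [PySem.Set.update, newElems]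
  | cons a l ih =>
    simp only [PySem.Set.update, List.foldl_cons, newElems] at *
    by_cases ha : a ∈ p
    · have hc : PySem.Set.contains s a = true := by
        simp [PySem.Set.contains, (h a).2 ha]
      simp only [PySem.Set.add, hc, if_true, if_pos ha]
      exact ih s p h
    · have hc : PySem.Set.contains s a = false := by
        simp [PySem.Set.contains]
        exact fun hc => ha ((h a).1 hc)
      simp only [PySem.Set.add, hc, Bool.false_eq_true, if_false, if_neg ha]
      rw [ih (s ++ [a]) (p ++ [a]) (by intro b; simp [h b])]
      simp

lemma ofList_eq_newElems (l : List Int) :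
    PySem.Set.ofList l = newElems [] l := by
  have := update_eq_append_newElems l [] [] (by simp)
  simpa [PySem.Set.ofList_eq_foldl, PySem.Set.update] using this

-- A's unique_list over p ++ l, restricted to the part produced by l
lemma uniqueListA_aux (l p : List Int) :
    (PySem.List.enumerate l (p.length : Int)).filterMap
      (fun q => if (PySem.List.index? (p ++ l) q.2).map (fun n : Nat => (n : Int)) = some q.1
                then some q.2 else none)
    = newElems p l := by
  induction l generalizing p with
  | nil => simp [PySem.List.enumerate_nil, newElems]
  | cons a l ih =>
    rw [PySem.List.enumerate_cons]
    simp only [List.filterMap_cons, newElems]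
    have hcast : ((p.length : Int) + 1) = ((p.length + 1 : Nat) : Int) := by push_cast; ring
    have hsplit : p ++ a :: l = (p ++ [a]) ++ l := by simp
    have htail : (PySem.List.enumerate l ((p.length : Int) + 1)).filterMap
        (fun q => if (PySem.List.index? (p ++ a :: l) q.2).map (fun n : Nat => (n : Int)) = some q.1
                  then some q.2 else none)
        = newElems (p ++ [a]) l := by
      have := ih (p ++ [a])
      simp only [List.length_append, List.length_singleton] at this
      rw [hcast, hsplit]
      exact this
    by_cases ha : a ∈ p
    · obtain ⟨k, hk⟩ : ∃ k, PySem.List.index? p a = some k :=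
        Option.isSome_iff_exists.1 ((PySem.List.index?_isSome_iff p a).2 ha)
      obtain ⟨hklt, -, -⟩ := PySem.List.getElem_of_index?_eq_some hk
      have hidx : PySem.List.index? (p ++ a :: l) a = some k := by
        rw [PySem.List.index?_append_of_mem _ ha]; exact hk
      rw [if_neg, if_pos ha]
      · rw [htail]
        -- a is already in p, so the seen sets p ++ [a] and p agree on membership
        exact newElems_congr l (p ++ [a]) p
          (fun b => by
            rw [List.mem_append, List.mem_singleton]
            exact ⟨fun h => h.elim id (fun e => e ▸ ha), Or.inl⟩)
      · rw [Option.map_eq_some_iff]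
        rintro ⟨n, hn, hcn⟩
        rw [hidx] at hn
        obtain rfl : k = n := by injection hn
        have : (k : Int) ≠ (p.length : Int) := by exact_mod_cast Nat.ne_of_lt hklt
        exact this hcn
    · have hidx : PySem.List.index? (p ++ a :: l) a = some p.length := by
        rw [hsplit, PySem.List.index?_append_of_mem _ (by simp),
            PySem.List.index?_append_singleton_self p a ha]
      rw [if_pos (by rw [hidx]; rfl), if_neg ha]
      rw [htail]

lemma uniqueListA_eq_newElems (l : List Int) : uniqueListA l = newElems [] l := by
  have := uniqueListA_aux l []
  simpa [uniqueListA] using this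

lemma map_fst_zip_eq_take (x : List Int) (y : List Int) :
    (x.zip y).map Prod.fst = x.take y.length := by
  induction x generalizing y with
  | nil => simp
  | cons a x ih =>
    cases y with
    | nil => simp
    | cons b y => simp [List.zip_cons_cons, ih y]

-- the two fold steps are the same function
lemma fold_step_eq :
    (fun (d : PySem.Dict Int Int) (p : Int × Int) =>
        if d.contains p.1 then d.insert p.1 (d.getD p.1 0 + p.2) else d.insert p.1 p.2)
    = (fun (d : PySem.Dict Int Int) (p : Int × Int) => d.insert p.1 (d.getD p.1 0 + p.2)) := by
  funext d p
  by_cases h : d.contains p.1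
  · simp [h]
  · simp only [Bool.not_eq_true] at h
    rw [if_neg (by simp [h]), PySem.Dict.getD_of_not_contains d 0 h, zero_add]

lemma keys_fold (x y : List Int) :
    ((x.zip y).foldl (fun d p => d.insert p.1 (d.getD p.1 0 + p.2)) PySem.Dict.empty).keys
      = PySem.Set.ofList (x.take y.length) := by
  rw [PySem.Dict.keys_foldl_insert_key (x.zip y) Prod.fst _ PySem.Dict.empty]
  simp [PySem.Dict.keys_empty, map_fst_zip_eq_take, PySem.Set.ofList_eq_foldl, PySem.Set.update]

-- ===== VERDICT (by name: the statement is the Claim_ definition above) =====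
theorem unique_two_lists_spec : Claim_equal_unique_two_lists := by
  intro x y _ hpre
  unfold Spec_unique_two_lists unique_two_lists unique_two_lists_alt
  rw [fold_step_eq]
  set d := (x.zip y).foldl (fun d p => d.insert p.1 (d.getD p.1 0 + p.2)) PySem.Dict.empty with hd
  have hnodup : d.keys.Nodup := by
    rw [hd]
    exact PySem.Dict.nodup_keys_foldl_insert_key _ _ _ _ (by simp [PySem.Dict.keys_empty])
  have hx : uniqueListA x = d.keys := by
    rw [hd, keys_fold, uniqueListA_eq_newElems, ofList_eq_newElems]
    conv_lhs => rw [← List.take_append_drop y.length x]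
    exact newElems_append_of_subset _ _ []
      (fun a ha => by simpa using hpre a (List.mem_of_mem_drop ha))
  have hvals : d.values = d.keys.map (fun a => d.getD a 0) :=
    PySem.Dict.values_eq_map_keys d hnodup 0
  show (uniqueListA x, (uniqueListA x).map (fun a => d.getD a 0)) = (d.keys, d.values)
  rw [hx, hvals]
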